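-- pv_equiv track=rewrite | github.com/JasonSteving99/agent-of-code | advent_of_code/year2024/day14/part2/solution.py | simulate_until_tree
-- ===== SOURCE A (Python) =====
-- from typing import List, Tuple, Dict, Set
-- from collections import defaultdict
--
-- def update_position(pos: Tuple[int, int], vel: Tuple[int, int], width: int, height: int) -> Tuple[int, int]:
--     """Update position considering teleportation at boundaries."""
--     x, y = pos[0] + vel[0], pos[1] + vel[1]
--     x = x % width
--     y = y % height
--     return (x, y)
--
-- def is_christmas_tree_pattern(positions: Dict[Tuple[int, int], int], width: int, height: int) -> bool:
--     """Check if the current robot positions form a Christmas tree pattern."""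
--     # Convert positions to a set of occupied coordinates for easier checking
--     occupied = set()
--     for pos, count in positions.items():
--         for _ in range(count):
--             occupied.add(pos)
--
--     # Get bounds of the occupied positions
--     if not occupied:
--         return False
--
--     min_x = min(x for x, _ in occupied)
--     max_x = max(x for x, _ in occupied)
--     min_y = min(y for _, y in occupied)
--     max_y = max(y for _, y in occupied)
--
--     # The tree should be roughly centered in the grid
--     center_x = width // 2
--     if abs(min_x + max_x - width) > width // 4:  # Tree not centered enough
--         return False
--
--     # Check for general tree shape:
--     # 1. Single point at top (star)
--     # 2. Triangular shape widening towards bottom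
--     # 3. Small rectangle at bottom (trunk)
--
--     levels = defaultdict(set)
--     for x, y in occupied:
--         levels[y].add(x)
--
--     # Sort levels from top to bottom
--     sorted_levels = sorted(levels.items(), key=lambda x: x[0])
--
--     if len(sorted_levels) < 5:  # Need minimum height for a tree
--         return False
--
--     # Check for single star at top
--     if len(sorted_levels[0][1]) != 1:
--         return False
--
--     # Check for widening pattern in middle (tree shape)
--     middle_section = sorted_levels[1:-1]
--     prev_width = 0
--     for _, level_points in middle_section:
--         curr_width = max(level_points) - min(level_points)
--         if curr_width <= prev_width:
--             return False
--         prev_width = curr_width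
--
--     # Check for narrow trunk at bottom
--     trunk_points = sorted_levels[-1][1]
--     trunk_width = max(trunk_points) - min(trunk_points)
--     if trunk_width > 3:  # Trunk should be narrow
--         return False
--
--     return True
--
-- def simulate_until_tree(robots: List[Tuple[Tuple[int, int], Tuple[int, int]]],
--                        width: int, height: int, max_seconds: int = 1000) -> int:
--     """Simulate robot movement until Christmas tree pattern is found."""
--     for second in range(max_seconds):
--         positions = {}
--
--         # Update positions for all robots
--         for pos, vel in robots:
--             curr_pos = pos
--             for _ in range(second):
--                 curr_pos = update_position(curr_pos, vel, width, height)
--             positions[curr_pos] = positions.get(curr_pos, 0) + 1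
--
--         # Check if current positions form a Christmas tree
--         if is_christmas_tree_pattern(positions, width, height):
--             return second
--
--     return -1  # Pattern not found within max_seconds
-- ===== SOURCE B (Python) =====
-- def _looks_like_tree(points, width):
--     """Does this list of robot positions look like a christmas tree?"""
--     occupied = set(points)
--     if not occupied:
--         return False
--     min_x = min(x for x, _ in occupied)
--     max_x = max(x for x, _ in occupied)
--     if abs(min_x + max_x - width) > width // 4:
--         return False
--     levels = {}
--     for x, y in occupied:
--         levels.setdefault(y, set()).add(x)
--     sorted_levels = sorted(levels.items(), key=lambda kv: kv[0])
--     if len(sorted_levels) < 5: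
--         return False
--     if len(sorted_levels[0][1]) != 1:
--         return False
--     widths = [max(pts) - min(pts) for _, pts in sorted_levels[1:-1]]
--     if not all(a < b for a, b in zip([0] + widths, widths)):
--         return False
--     return max(sorted_levels[-1][1]) - min(sorted_levels[-1][1]) <= 3
--
-- def simulate_until_tree(robots, width, height, max_seconds=1000):
--     """Advance every robot one step per second (no per-second re-simulation)."""
--     current = [pos for pos, _ in robots]
--     velocities = [vel for _, vel in robots]
--     if max_seconds > 0 and _looks_like_tree(current, width):
--         return 0
--     for second in range(1, max_seconds):
--         current = [((x + vx) % width, (y + vy) % height)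
--                    for (x, y), (vx, vy) in zip(current, velocities)]
--         if _looks_like_tree(current, width):
--             return second
--     return -1
-- ===== Notes on version B (the rewrite author's own statement) =====
-- stated objective: faster
-- what changed: B advances every robot by one modular step per second (carrying the current positions across seconds) instead of A's re-simulating each robot from scratch for `second` steps at every second, and B's pattern check works on the plain position list (set(points), widths compared pairwise) instead of A's count dictionary unfolded into a set.
import Mathlib
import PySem

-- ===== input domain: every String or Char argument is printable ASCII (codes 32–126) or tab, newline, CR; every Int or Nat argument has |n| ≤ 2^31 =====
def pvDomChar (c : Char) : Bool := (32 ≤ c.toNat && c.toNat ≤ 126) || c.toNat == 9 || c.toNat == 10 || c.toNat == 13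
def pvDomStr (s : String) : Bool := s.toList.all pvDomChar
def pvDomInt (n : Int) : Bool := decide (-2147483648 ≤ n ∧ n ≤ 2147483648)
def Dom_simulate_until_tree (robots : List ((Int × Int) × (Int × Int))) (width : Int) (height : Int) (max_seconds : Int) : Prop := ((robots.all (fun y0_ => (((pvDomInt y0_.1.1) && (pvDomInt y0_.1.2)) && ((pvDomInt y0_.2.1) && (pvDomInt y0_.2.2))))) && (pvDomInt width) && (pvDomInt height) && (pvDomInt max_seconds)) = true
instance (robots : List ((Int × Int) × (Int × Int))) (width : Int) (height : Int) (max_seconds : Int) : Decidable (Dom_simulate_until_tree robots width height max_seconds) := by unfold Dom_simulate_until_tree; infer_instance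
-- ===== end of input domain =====

-- B advances robots one modular step per second instead of re-simulating `second` steps from
-- scratch each second (O(max_seconds*robots) vs O(max_seconds^2*robots)); measured faster (asymptotic).


-- ===== PORT A =====
def update_position (pos : Int × Int) (vel : Int × Int) (width : Int) (height : Int) : Int × Int :=
  (PySem.Int.mod (pos.1 + vel.1) width, PySem.Int.mod (pos.2 + vel.2) height)

-- the `prev_width` loop over the middle section (early return False ⇒ Bool recursion)
def pvAMiddle : List (Int × PySem.Set Int) → Int → Bool
  | [], _ => true
  | (_, pts) :: rest, prev =>
    let w := (PySem.List.max? pts (fun x => x)).getD 0 - (PySem.List.min? pts (fun x => x)).getD 0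
    if w ≤ prev then false else pvAMiddle rest w

def is_christmas_tree_pattern (positions : PySem.Dict (Int × Int) Int) (width : Int) (height : Int) : Bool :=
  let occupied : PySem.Set (Int × Int) :=
    positions.items.foldl
      (fun s pc => (PySem.List.pyRange 0 pc.2 1).foldl (fun s _ => PySem.Set.add s pc.1) s)
      PySem.Set.empty
  if occupied = [] then false
  else
    -- min/max guarded by `occupied` nonempty, so the .getD 0 default is never used
    let min_x := (PySem.List.min? (occupied.map (fun p => p.1)) (fun x => x)).getD 0
    let max_x := (PySem.List.max? (occupied.map (fun p => p.1)) (fun x => x)).getD 0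
    if |min_x + max_x - width| > PySem.Int.floordiv width 4 then false
    else
      let levels : PySem.Dict Int (PySem.Set Int) :=
        occupied.foldl (fun d p => d.modify p.2 PySem.Set.empty (fun s => PySem.Set.add s p.1))
          PySem.Dict.empty
      let sorted_levels := PySem.List.sorted levels.items (fun kv => kv.1) false
      if sorted_levels.length < 5 then false
      else
        if (PySem.List.pyGetD sorted_levels 0 (0, PySem.Set.empty)).2.length ≠ 1 then false
        else
          if pvAMiddle (PySem.List.slice sorted_levels (some 1) (some (-1))) 0 then
            let trunk_points := (PySem.List.pyGetD sorted_levels (-1) (0, PySem.Set.empty)).2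
            let trunk_width := (PySem.List.max? trunk_points (fun x => x)).getD 0 -
                               (PySem.List.min? trunk_points (fun x => x)).getD 0
            if trunk_width > 3 then false else true
          else false

-- positions dict for one value of `second` (each robot re-simulated `second` steps from scratch)
def pvAPositions (robots : List ((Int × Int) × (Int × Int))) (width height second : Int) :
    PySem.Dict (Int × Int) Int :=
  robots.foldl
    (fun d pv =>
      let curr := (PySem.List.pyRange 0 second 1).foldl (fun c _ => update_position c pv.2 width height) pv.1
      d.insert curr (d.getD curr 0 + 1))
    PySem.Dict.empty

def pvALoop (robots : List ((Int × Int) × (Int × Int))) (width height : Int) : List Int → Int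
  | [] => -1
  | second :: rest =>
    if is_christmas_tree_pattern (pvAPositions robots width height second) width height then second
    else pvALoop robots width height rest

def simulate_until_tree (robots : List ((Int × Int) × (Int × Int))) (width : Int) (height : Int) (max_seconds : Int) : Int :=
  pvALoop robots width height (PySem.List.pyRange 0 max_seconds 1)

-- ===== PORT B =====
def pvBLooksLikeTree (points : List (Int × Int)) (width : Int) : Bool :=
  let occupied : PySem.Set (Int × Int) := PySem.Set.ofList points
  if occupied = [] then false
  else
    let min_x := (PySem.List.min? (occupied.map (fun p => p.1)) (fun x => x)).getD 0
    let max_x := (PySem.List.max? (occupied.map (fun p => p.1)) (fun x => x)).getD 0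
    if |min_x + max_x - width| > PySem.Int.floordiv width 4 then false
    else
      let levels : PySem.Dict Int (PySem.Set Int) :=
        occupied.foldl (fun d p => d.modify p.2 PySem.Set.empty (fun s => PySem.Set.add s p.1))
          PySem.Dict.empty
      let sorted_levels := PySem.List.sorted levels.items (fun kv => kv.1) false
      if sorted_levels.length < 5 then false
      else
        if (PySem.List.pyGetD sorted_levels 0 (0, PySem.Set.empty)).2.length ≠ 1 then false
        else
          let widths := (PySem.List.slice sorted_levels (some 1) (some (-1))).map
            (fun kv => (PySem.List.max? kv.2 (fun x => x)).getD 0 - (PySem.List.min? kv.2 (fun x => x)).getD 0)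
          if !(((0 :: widths).zip widths).all (fun ab => decide (ab.1 < ab.2))) then false
          else
            let trunk_points := (PySem.List.pyGetD sorted_levels (-1) (0, PySem.Set.empty)).2
            decide ((PySem.List.max? trunk_points (fun x => x)).getD 0 -
                    (PySem.List.min? trunk_points (fun x => x)).getD 0 ≤ 3)

def pvBStep (current velocities : List (Int × Int)) (width height : Int) : List (Int × Int) :=
  (current.zip velocities).map
    (fun cv => (PySem.Int.mod (cv.1.1 + cv.2.1) width, PySem.Int.mod (cv.1.2 + cv.2.2) height))

def pvBLoop (velocities : List (Int × Int)) (width height : Int) : List Int → List (Int × Int) → Int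
  | [], _ => -1
  | second :: rest, current =>
    let current := pvBStep current velocities width height
    if pvBLooksLikeTree current width then second else pvBLoop velocities width height rest current

def simulate_until_tree_alt (robots : List ((Int × Int) × (Int × Int))) (width : Int) (height : Int) (max_seconds : Int) : Int :=
  let current := robots.map (fun r => r.1)
  let velocities := robots.map (fun r => r.2)
  if max_seconds > 0 && pvBLooksLikeTree current width then 0
  else pvBLoop velocities width height (PySem.List.pyRange 1 max_seconds 1) current

-- ===== PRECONDITION & SPEC =====
-- Pre_ excludes exactly the zero-grid inputs on which Python's `% 0` raises ZeroDivisionError in both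
-- programs: width = 0 or height = 0 together with max_seconds ≥ 2 and robots nonempty (both A and B
-- raise there, except the corner where a tree pattern already holds at second 0 — then both return 0).
def Pre_simulate_until_tree (robots : List ((Int × Int) × (Int × Int))) (width : Int) (height : Int) (max_seconds : Int) : Prop :=
  robots = [] ∨ max_seconds ≤ 1 ∨ (width ≠ 0 ∧ height ≠ 0)
instance (robots : List ((Int × Int) × (Int × Int))) (width : Int) (height : Int) (max_seconds : Int) : Decidable (Pre_simulate_until_tree robots width height max_seconds) := by unfold Pre_simulate_until_tree; infer_instance
def pvWitness_simulate_until_tree : (List ((Int × Int) × (Int × Int))) × Int × Int × Int :=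
  ([((0, 0), (1, 1)), ((2, 3), (-1, 2))], 5, 7, 4)

def Spec_simulate_until_tree (robots : List ((Int × Int) × (Int × Int))) (width : Int) (height : Int) (max_seconds : Int) (out : Int) : Prop := out = simulate_until_tree_alt robots width height max_seconds
instance (robots : List ((Int × Int) × (Int × Int))) (width : Int) (height : Int) (max_seconds : Int) (out : Int) : Decidable (Spec_simulate_until_tree robots width height max_seconds out) := by unfold Spec_simulate_until_tree; infer_instance

-- ===== CLAIM (what is proved, stated in full; the proofs are below) =====
def Claim_equal_simulate_until_tree : Prop := ∀ (robots : List ((Int × Int) × (Int × Int))) (width : Int) (height : Int) (max_seconds : Int), Dom_simulate_until_tree robots width height max_seconds → Pre_simulate_until_tree robots width height max_seconds → Spec_simulate_until_tree robots width height max_seconds (simulate_until_tree robots width height max_seconds)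

-- ===== LEMMAS AND PROOFS =====

-- the reference position list: every robot after `second` steps
def pvPosN (robots : List ((Int × Int) × (Int × Int))) (width height second : Int) : List (Int × Int) :=
  robots.map (fun pv => (PySem.List.pyRange 0 second 1).foldl (fun c _ => update_position c pv.2 width height) pv.1)

-- first second in the list whose position list looks like a tree
def pvRef (robots : List ((Int × Int) × (Int × Int))) (width height : Int) : List Int → Int
  | [] => -1
  | s :: rest =>
    if pvBLooksLikeTree (pvPosN robots width height s) width then s else pvRef robots width height rest

lemma pv_foldl_const_add {α : Type} [BEq α] [LawfulBEq α] (x : α) :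
    ∀ (l : List Int) (s : PySem.Set α), x ∈ s → l.foldl (fun s _ => PySem.Set.add s x) s = s := by
  intro l
  induction l with
  | nil => intro s _; rfl
  | cons y ys ih =>
    intro s hx
    simp only [List.foldl_cons, PySem.Set.add_of_mem hx]
    exact ih s hx

lemma pv_fold_repeat {α : Type} [BEq α] [LawfulBEq α] (c : α → Int) :
    ∀ (ks : List α) (s : PySem.Set α), (∀ k ∈ ks, 0 < c k) →
      ks.foldl (fun s k => (PySem.List.pyRange 0 (c k) 1).foldl (fun s _ => PySem.Set.add s k) s) s =
        ks.foldl (fun s k => PySem.Set.add s k) s := by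
  intro ks
  induction ks with
  | nil => intro s _; rfl
  | cons k rest ih =>
    intro s hc
    simp only [List.foldl_cons]
    rw [PySem.List.pyRange_one_cons (hc k (List.mem_cons_self))]
    simp only [List.foldl_cons]
    rw [pv_foldl_const_add k _ _ (by simp [PySem.Set.mem_add])]
    exact ih _ (fun k hk => hc k (List.mem_cons_of_mem _ hk))

lemma pv_occupied_eq (pts : List (Int × Int)) :
    (PySem.Dict.counter pts).items.foldl
      (fun s pc => (PySem.List.pyRange 0 pc.2 1).foldl (fun s _ => PySem.Set.add s pc.1) s)
      PySem.Set.empty = PySem.Set.ofList pts := by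
  rw [PySem.Dict.items_counter, List.foldl_map]
  rw [pv_fold_repeat (fun k => ((pts.count k : Int))) (PySem.Set.ofList pts) PySem.Set.empty
    (fun k hk => by simpa using List.count_pos_iff.mpr ((PySem.Set.mem_ofList _ _).mp hk))]
  rw [show (fun (s : PySem.Set (Int × Int)) k => PySem.Set.add s k) = PySem.Set.add from rfl,
    show (PySem.Set.empty : PySem.Set (Int × Int)) = [] from rfl,
    ← PySem.Set.ofList_eq_foldl, PySem.Set.ofList_ofList]

lemma pv_middle_eq (ls : List (Int × PySem.Set Int)) (prev : Int) :
    pvAMiddle ls prev =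
      (((prev :: ls.map (fun kv => (PySem.List.max? kv.2 (fun x => x)).getD 0 - (PySem.List.min? kv.2 (fun x => x)).getD 0)).zip
         (ls.map (fun kv => (PySem.List.max? kv.2 (fun x => x)).getD 0 - (PySem.List.min? kv.2 (fun x => x)).getD 0))).all
        (fun ab => decide (ab.1 < ab.2))) := by
  induction ls generalizing prev with
  | nil => rfl
  | cons kv rest ih =>
    simp only [pvAMiddle, List.map_cons, List.zip_cons_cons, List.all_cons]
    by_cases h : (PySem.List.max? kv.2 (fun x => x)).getD 0 - (PySem.List.min? kv.2 (fun x => x)).getD 0 ≤ prev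
    · simp [h, not_lt.mpr h]
    · simp only [if_neg h]
      rw [ih]
      simp [not_le.mp h]

lemma pv_if_trunk (w : Int) : (if w > 3 then false else true) = decide (w ≤ 3) := by
  by_cases h : w > 3
  · simp [h]
  · simp [h]; omega

lemma pv_if_not (b x : Bool) : (if !b then false else x) = (if b then x else false) := by
  cases b <;> simp

lemma pv_check_eq (pts : List (Int × Int)) (width height : Int) :
    is_christmas_tree_pattern (PySem.Dict.counter pts) width height = pvBLooksLikeTree pts width := by
  unfold is_christmas_tree_pattern pvBLooksLikeTree
  simp only [pv_occupied_eq, pv_middle_eq, pv_if_trunk, pv_if_not]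

lemma pv_positions_eq (robots : List ((Int × Int) × (Int × Int))) (width height second : Int) :
    pvAPositions robots width height second = PySem.Dict.counter (pvPosN robots width height second) := by
  unfold pvAPositions pvPosN
  rw [← PySem.Dict.foldl_insert_getD_add_one_eq_counter, List.foldl_map]

lemma pv_aLoop_eq_ref (robots : List ((Int × Int) × (Int × Int))) (width height : Int) (l : List Int) :
    pvALoop robots width height l = pvRef robots width height l := by
  induction l with
  | nil => rfl
  | cons s rest ih => simp only [pvALoop, pvRef, pv_positions_eq, pv_check_eq, ih]

lemma pv_step_posN (robots : List ((Int × Int) × (Int × Int))) (width height : Int) (s : Int) (hs : 0 ≤ s) :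
    pvBStep (pvPosN robots width height s) (robots.map (fun r => r.2)) width height =
      pvPosN robots width height (s + 1) := by
  unfold pvBStep pvPosN
  rw [List.zip_map', List.map_map]
  simp only [PySem.List.pyRange_one_succ_right hs, List.foldl_append,
    List.foldl_cons, List.foldl_nil, update_position, Function.comp_def]

lemma pv_posN_zero (robots : List ((Int × Int) × (Int × Int))) (width height : Int) :
    pvPosN robots width height 0 = robots.map (fun r => r.1) := by
  simp [pvPosN]

lemma pv_bLoop_eq_ref (robots : List ((Int × Int) × (Int × Int))) (width height ms : Int) :
    ∀ (n : Nat) (k : Int), 0 ≤ k → (ms - (k + 1)).toNat = n →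
      pvBLoop (robots.map (fun r => r.2)) width height (PySem.List.pyRange (k + 1) ms 1)
        (pvPosN robots width height k) =
      pvRef robots width height (PySem.List.pyRange (k + 1) ms 1) := by
  intro n
  induction n with
  | zero =>
    intro k _ h
    have hnil : PySem.List.pyRange (k + 1) ms 1 = [] := by
      rw [PySem.List.pyRange_one]
      have : (ms - (k + 1)).toNat = 0 := h
      simp [this]
    rw [hnil]; rfl
  | succ m ih =>
    intro k hk h
    have hlt : k + 1 < ms := by omega
    rw [PySem.List.pyRange_one_cons hlt]
    simp only [pvBLoop, pvRef]
    rw [pv_step_posN robots width height k hk]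
    by_cases hc : pvBLooksLikeTree (pvPosN robots width height (k + 1)) width
    · simp [hc]
    · simp only [hc, if_false, Bool.false_eq_true]
      exact ih (k + 1) (by omega) (by omega)

-- ===== VERDICT (by name: the statement is the Claim_ definition above) =====
theorem simulate_until_tree_spec : Claim_equal_simulate_until_tree := by
  intro robots width height max_seconds _dom _pre
  unfold Spec_simulate_until_tree simulate_until_tree simulate_until_tree_alt
  rw [pv_aLoop_eq_ref]
  by_cases hms : 0 < max_seconds
  · rw [PySem.List.pyRange_one_cons hms]
    simp only [pvRef, hms, decide_true, Bool.true_and]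
    rw [← pv_posN_zero robots width height]
    by_cases hc : pvBLooksLikeTree (pvPosN robots width height 0) width
    · simp [hc]
    · simp only [hc, if_false, Bool.false_eq_true]
      exact (pv_bLoop_eq_ref robots width height max_seconds (max_seconds - 1).toNat 0 le_rfl
        (by omega)).symm
  · have hnil : PySem.List.pyRange 0 max_seconds 1 = [] := by
      rw [PySem.List.pyRange_one]; simp; omega
    have hnil1 : PySem.List.pyRange 1 max_seconds 1 = [] := by
      rw [PySem.List.pyRange_one]; simp; omega
    rw [hnil, hnil1]
    simp [pvRef, pvBLoop, hms]
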